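-- pv_equiv track=rewrite | github.com/PaulBatchelor/dzbrowse | generate.py | get_top_nodes
-- ===== SOURCE A (Python) =====
-- def get_top_nodes(nodes, connections):
--     top_nodes = []
--     def any_local_nodes(receiving_nodes):
--         for nid in receiving_nodes:
--             if nid in nodes:
--                 return True
--         return False
--
--     for nid in nodes:
--         if nid not in connections or any_local_nodes(connections[nid]) == False:
--             top_nodes.append(nid)
--
--     return top_nodes
-- ===== SOURCE B (Python) =====
-- def get_top_nodes(nodes, connections):
--     # Sort-merge join: sort the node keys and the (target, source) edge pairs,
--     # then one two-pointer sweep marks every source with a local target.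
--     keys = sorted(nodes)
--     pairs = sorted(((t, s) for s, ts in connections.items() for t in ts),
--                    key=lambda p: p[0])
--     has_local = set()
--     i = j = 0
--     while i < len(keys) and j < len(pairs):
--         t, s = pairs[j]
--         if t < keys[i]:
--             j += 1
--         elif keys[i] < t:
--             i += 1
--         else:
--             has_local.add(s)
--             j += 1
--     return [nid for nid in nodes if nid not in has_local]
-- ===== Notes on version B (the rewrite author's own statement) =====
-- stated objective: alternative
-- what changed: B replaces A's per-target dict-membership tests with a sort-merge join: it sorts the node keys and the (target, source) edge pairs and marks sources with a local target in a single two-pointer sweep, then filters the node keys; no membership test against the node collection remains.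
import Mathlib
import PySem

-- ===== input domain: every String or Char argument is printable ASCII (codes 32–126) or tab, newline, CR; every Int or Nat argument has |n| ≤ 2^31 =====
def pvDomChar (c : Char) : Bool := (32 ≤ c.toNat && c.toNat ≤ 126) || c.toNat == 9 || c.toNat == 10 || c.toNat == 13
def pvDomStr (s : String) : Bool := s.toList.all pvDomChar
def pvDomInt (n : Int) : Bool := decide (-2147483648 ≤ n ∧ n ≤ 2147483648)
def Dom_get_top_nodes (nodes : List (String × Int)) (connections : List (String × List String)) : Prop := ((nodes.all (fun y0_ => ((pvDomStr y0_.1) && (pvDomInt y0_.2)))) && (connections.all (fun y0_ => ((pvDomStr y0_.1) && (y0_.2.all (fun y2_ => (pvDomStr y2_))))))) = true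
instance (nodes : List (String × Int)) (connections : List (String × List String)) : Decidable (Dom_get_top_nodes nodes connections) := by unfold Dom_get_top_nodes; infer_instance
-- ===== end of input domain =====

-- B replaces A's per-target membership tests with a sort-merge join (sorted keys, sorted edge
-- pairs, one two-pointer sweep); an alternative algorithm, return values are proved equal.

-- ===== PORT A =====
-- helper: Python's inner 'any_local_nodes' — scan the targets, return True on the first one that is a key of nodes
def pvAnyLocal (nd : PySem.Dict String Int) : List String → Bool
  | [] => false
  | r :: rest => if nd.contains r then true else pvAnyLocal nd rest

def get_top_nodes (nodes : List (String × Int)) (connections : List (String × List String)) : List String :=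
  let nd := PySem.Dict.ofList nodes
  let cd := PySem.Dict.ofList connections
  -- 'connections[nid]' is only reached when 'nid in connections', so getD with a dummy default is exact
  nd.keys.foldl
    (fun acc nid =>
      if !cd.contains nid || pvAnyLocal nd (cd.getD nid []) == false then acc ++ [nid] else acc)
    []

-- ===== PORT B =====
-- the two-pointer sweep of Source B over the sorted key list and the sorted (target, source) pairs
def pvMergeJoin : List String → List (String × String) → PySem.Set String → PySem.Set String
  | _, [], hl => hl
  | [], _ :: _, hl => hl
  | k :: ks, (t, s) :: ps, hl =>
    if t < k then pvMergeJoin (k :: ks) ps hl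
    else if k < t then pvMergeJoin ks ((t, s) :: ps) hl
    else pvMergeJoin (k :: ks) ps (PySem.Set.add hl s)
termination_by ks ps _ => ks.length + ps.length

def get_top_nodes_alt (nodes : List (String × Int)) (connections : List (String × List String)) : List String :=
  let nodeKeys := (PySem.Dict.ofList nodes).keys
  let keys := PySem.List.sorted nodeKeys (fun x => x) false
  let pairs := PySem.List.sorted
      ((PySem.Dict.ofList connections).items.flatMap (fun p => p.2.map (fun t => (t, p.1))))
      (fun p => p.1) false
  let has_local := pvMergeJoin keys pairs PySem.Set.empty
  nodeKeys.filter (fun nid => !(PySem.Set.contains has_local nid))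

-- ===== PRECONDITION & SPEC =====
def Spec_get_top_nodes (nodes : List (String × Int)) (connections : List (String × List String)) (out : List String) : Prop := out = get_top_nodes_alt nodes connections
instance (nodes : List (String × Int)) (connections : List (String × List String)) (out : List String) : Decidable (Spec_get_top_nodes nodes connections out) := by unfold Spec_get_top_nodes; infer_instance

-- ===== CLAIM (what is proved, stated in full; the proofs are below) =====
def Claim_equal_get_top_nodes : Prop := ∀ (nodes : List (String × Int)) (connections : List (String × List String)), Dom_get_top_nodes nodes connections → Spec_get_top_nodes nodes connections (get_top_nodes nodes connections)

-- ===== LEMMAS AND PROOFS =====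

theorem pvAnyLocal_eq_any (nd : PySem.Dict String Int) (ts : List String) :
    pvAnyLocal nd ts = ts.any (fun t => nd.contains t) := by
  induction ts with
  | nil => rfl
  | cons r rest ih => by_cases h : nd.contains r = true <;> simp [pvAnyLocal, ih, h]

-- the sweep collects exactly the sources of pairs whose target occurs among the keys
theorem mem_pvMergeJoin (ks : List String) (ps : List (String × String)) (hl : PySem.Set String)
    (hks : ks.Pairwise (· ≤ ·)) (hps : ps.Pairwise (fun a b => a.1 ≤ b.1)) (x : String) :
    (x ∈ pvMergeJoin ks ps hl) ↔ x ∈ hl ∨ ∃ p ∈ ps, p.1 ∈ ks ∧ x = p.2 := by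
  induction ks, ps, hl using pvMergeJoin.induct with
  | case1 ks hl => simp [pvMergeJoin]
  | case2 p ps hl => simp [pvMergeJoin]
  | case3 k ks t s ps hl hlt ih =>
    rw [pvMergeJoin, if_pos hlt, ih hks hps.of_cons]
    have hnot : t ∉ k :: ks := by
      intro hmem
      rcases List.mem_cons.mp hmem with rfl | hmem
      · exact lt_irrefl t hlt
      · exact absurd ((List.pairwise_cons.mp hks).1 t hmem) ((not_le.mpr hlt))
    simp only [List.mem_cons]
    constructor
    · rintro (h | ⟨p, hp, h1, h2⟩)
      · exact Or.inl h
      · exact Or.inr ⟨p, Or.inr hp, h1, h2⟩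
    · rintro (h | ⟨p, (rfl | hp), h1, h2⟩)
      · exact Or.inl h
      · exact absurd (List.mem_cons.mpr h1) hnot
      · exact Or.inr ⟨p, hp, h1, h2⟩
  | case4 k ks t s ps hl hnlt hlt ih =>
    rw [pvMergeJoin, if_neg hnlt, if_pos hlt, ih hks.of_cons hps]
    have hne : ∀ p ∈ (t, s) :: ps, p.1 ≠ k := by
      intro p hp
      rcases List.mem_cons.mp hp with rfl | hp
      · exact ne_of_gt hlt
      · exact ne_of_gt (lt_of_lt_of_le hlt ((List.pairwise_cons.mp hps).1 p hp))
    constructor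
    · rintro (h | ⟨p, hp, h1, h2⟩)
      · exact Or.inl h
      · exact Or.inr ⟨p, hp, List.mem_cons_of_mem _ h1, h2⟩
    · rintro (h | ⟨p, hp, h1, h2⟩)
      · exact Or.inl h
      · rcases List.mem_cons.mp h1 with h1 | h1
        · exact absurd h1 (hne p hp)
        · exact Or.inr ⟨p, hp, h1, h2⟩
  | case5 k ks t s ps hl hnlt hnlt' ih =>
    have heq : t = k := le_antisymm (not_lt.mp hnlt') (not_lt.mp hnlt)
    subst heq
    rw [pvMergeJoin, if_neg hnlt, if_neg hnlt', ih hks hps.of_cons, PySem.Set.mem_add]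
    simp only [List.mem_cons]
    constructor
    · rintro ((h | rfl) | ⟨p, hp, h1, h2⟩)
      · exact Or.inl h
      · exact Or.inr ⟨(t, x), Or.inl rfl, Or.inl rfl, rfl⟩
      · exact Or.inr ⟨p, Or.inr hp, h1, h2⟩
    · rintro (h | ⟨p, (rfl | hp), h1, h2⟩)
      · exact Or.inl (Or.inl h)
      · exact Or.inl (Or.inr h2)
      · exact Or.inr ⟨p, hp, h1, h2⟩

theorem get_top_nodes_spec : Claim_equal_get_top_nodes := by
  intro nodes connections _
  unfold Spec_get_top_nodes get_top_nodes get_top_nodes_alt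
  simp only
  rw [PySem.List.foldl_append_if_eq_filter, List.nil_append]
  apply List.filter_congr
  intro nid _
  set nd := PySem.Dict.ofList nodes with hnd
  set cd := PySem.Dict.ofList connections with hcd
  have hnodupc : cd.keys.Nodup := PySem.Dict.nodup_keys_ofList connections
  set rawPairs := cd.items.flatMap (fun p => p.2.map (fun t => (t, p.1))) with hraw
  set hl := pvMergeJoin (PySem.List.sorted nd.keys (fun x => x) false)
      (PySem.List.sorted rawPairs (fun p => p.1) false) PySem.Set.empty with hhl
  have hmem : ∀ x : String, x ∈ hl ↔ ∃ p ∈ cd.items, p.2.any (fun t => nd.contains t) = true ∧ x = p.1 := by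
    intro x
    rw [hhl, mem_pvMergeJoin _ _ _ (PySem.List.sorted_pairwise _ _)
        (PySem.List.sorted_pairwise _ _)]
    have hempty : x ∉ (PySem.Set.empty : PySem.Set String) := by
      simp [PySem.Set.empty]
    simp only [hempty, false_or]
    constructor
    · rintro ⟨q, hq, hq1, rfl⟩
      rw [PySem.List.mem_sorted] at hq
      rcases List.mem_flatMap.mp hq with ⟨p, hp, hq'⟩
      rcases List.mem_map.mp hq' with ⟨t, ht, rfl⟩
      refine ⟨p, hp, ?_, rfl⟩
      rw [List.any_eq_true]
      rw [PySem.List.mem_sorted] at hq1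
      exact ⟨t, ht, (PySem.Dict.contains_iff_mem_keys nd t).mpr hq1⟩
    · rintro ⟨p, hp, hany, rfl⟩
      rcases List.any_eq_true.mp hany with ⟨t, ht, hc⟩
      refine ⟨(t, p.1), ?_, ?_, rfl⟩
      · rw [PySem.List.mem_sorted]
        exact List.mem_flatMap.mpr ⟨p, hp, List.mem_map.mpr ⟨t, ht, rfl⟩⟩
      · rw [PySem.List.mem_sorted]
        exact (PySem.Dict.contains_iff_mem_keys nd t).mp hc
  cases hget : cd.get? nid with
  | none =>
    have hcontains : cd.contains nid = false := by
      rw [PySem.Dict.contains_eq_isSome_get?, hget]; rfl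
    have hc2 : PySem.Set.contains hl nid = false := by
      rw [Bool.eq_false_iff]
      intro h
      rcases (hmem nid).mp ((PySem.Set.contains_iff hl nid).mp h) with ⟨p, hp, _, rfl⟩
      have hk := PySem.Dict.mem_keys_of_mem_items cd hp
      rw [← PySem.Dict.contains_iff_mem_keys] at hk
      rw [hcontains] at hk
      exact Bool.false_ne_true hk
    rw [hcontains, hc2]
    rfl
  | some ts =>
    have hcontains : cd.contains nid = true := by
      rw [PySem.Dict.contains_eq_isSome_get?, hget]; rfl
    have hgetD : cd.getD nid [] = ts := PySem.Dict.getD_of_get?_eq_some cd [] hget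
    have hc2 : PySem.Set.contains hl nid = ts.any (fun t => nd.contains t) := by
      cases hb : ts.any (fun t => nd.contains t) with
      | true =>
        exact (PySem.Set.contains_iff hl nid).mpr
          ((hmem nid).mpr ⟨(nid, ts), PySem.Dict.mem_items_of_get?_eq_some cd hget, hb, rfl⟩)
      | false =>
        rw [Bool.eq_false_iff]
        intro h
        rcases (hmem nid).mp ((PySem.Set.contains_iff hl nid).mp h) with ⟨p, hp, hany, rfl⟩
        have := PySem.Dict.get?_of_mem_items cd hp hnodupc
        rw [hget] at this
        cases this
        rw [hany] at hb
        simp at hb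
    rw [hcontains, pvAnyLocal_eq_any, hgetD, hc2]
    cases ts.any (fun t => nd.contains t) <;> rfl
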